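-- pv_equiv track=rewrite | github.com/SamWheating/AdventOfCode2021 | 20/solution.py | get_neighbours_int
-- ===== SOURCE A (Python) =====
-- def get_neighbours_int(image, x, y, inverted=False):
--
--     num = ""
--     for dy in [-1,0,1]:
--         for dx in [-1,0,1]:
--             if (x+dx, y+dy) in image:
--                 num += "1"
--             else:
--                 num += "0"
--
--     if inverted:
--         num = "".join(["1" if c == "0" else "0" for c in num])
--
--     return int(num, 2)
-- ===== SOURCE B (Python) =====
-- _WEIGHTS = {(-1, -1): 256, (0, -1): 128, (1, -1): 64,
--             (-1, 0): 32, (0, 0): 16, (1, 0): 8,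
--             (-1, 1): 4, (0, 1): 2, (1, 1): 1}
--
--
-- def get_neighbours_int(image, x, y, inverted=False):
--     val = 0
--     for (px, py) in image:
--         val |= _WEIGHTS.get((px - x, py - y), 0)
--     return val ^ 511 if inverted else val
-- ===== Notes on version B (the rewrite author's own statement) =====
-- stated objective: alternative
-- what changed: B inverts the traversal: instead of scanning the 3x3 window and testing membership of each cell in image (building a binary string and parsing it), B makes one pass over image itself, OR-ing in a bit weight looked up in a static offset-to-weight table for points that fall in the window, and handles inversion with a single XOR against 511.
import Mathlib
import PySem

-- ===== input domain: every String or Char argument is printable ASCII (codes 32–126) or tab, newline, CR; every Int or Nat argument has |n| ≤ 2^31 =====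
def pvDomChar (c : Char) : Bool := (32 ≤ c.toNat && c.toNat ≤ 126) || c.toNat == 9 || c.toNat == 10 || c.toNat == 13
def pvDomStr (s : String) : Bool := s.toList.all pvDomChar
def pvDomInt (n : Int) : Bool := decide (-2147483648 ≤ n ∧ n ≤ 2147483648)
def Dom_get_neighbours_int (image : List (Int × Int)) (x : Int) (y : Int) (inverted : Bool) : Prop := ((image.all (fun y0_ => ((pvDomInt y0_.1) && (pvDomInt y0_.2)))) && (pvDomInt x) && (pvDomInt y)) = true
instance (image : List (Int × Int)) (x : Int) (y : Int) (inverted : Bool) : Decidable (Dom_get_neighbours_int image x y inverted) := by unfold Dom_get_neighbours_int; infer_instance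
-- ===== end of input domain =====

-- B inverts the traversal: one pass over image, OR-ing in a weight from a static
-- offset→weight table, with inversion as one XOR with 511 (objective: alternative).

-- ===== PORT A =====
-- num is always a 9-character string of '0'/'1', so int(num, 2) always succeeds; .getD 0 is never taken.
def get_neighbours_int (image : List (Int × Int)) (x : Int) (y : Int) (inverted : Bool) : Int :=
  let num : String :=
    ([-1, 0, 1] : List Int).foldl (fun acc dy =>
      ([-1, 0, 1] : List Int).foldl (fun acc dx =>
        acc ++ (if (x + dx, y + dy) ∈ image then "1" else "0")) acc) ""
  let num : String :=
    if inverted then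
      String.mk (num.toList.map (fun c => if c = '0' then '1' else '0'))
    else num
  (PySem.Int.ofStrBase? num 2).getD 0

-- ===== PORT B =====
-- the module-level _WEIGHTS dict of Source B
def pvWeights : PySem.Dict (Int × Int) Int :=
  PySem.Dict.ofList [((-1,-1),256), ((0,-1),128), ((1,-1),64),
                     ((-1,0),32), ((0,0),16), ((1,0),8),
                     ((-1,1),4), ((0,1),2), ((1,1),1)]

def get_neighbours_int_alt (image : List (Int × Int)) (x : Int) (y : Int) (inverted : Bool) : Int :=
  let val : Int :=
    image.foldl (fun v p => PySem.Int.bor v (pvWeights.getD (p.1 - x, p.2 - y) 0)) 0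
  if inverted then PySem.Int.bxor val 511 else val

-- ===== PRECONDITION & SPEC =====
def Spec_get_neighbours_int (image : List (Int × Int)) (x : Int) (y : Int) (inverted : Bool) (out : Int) : Prop := out = get_neighbours_int_alt image x y inverted
instance (image : List (Int × Int)) (x : Int) (y : Int) (inverted : Bool) (out : Int) : Decidable (Spec_get_neighbours_int image x y inverted out) := by unfold Spec_get_neighbours_int; infer_instance

-- ===== CLAIM (what is proved, stated in full; the proofs are below) =====
def Claim_equal_get_neighbours_int : Prop := ∀ (image : List (Int × Int)) (x : Int) (y : Int) (inverted : Bool), Dom_get_neighbours_int image x y inverted → Spec_get_neighbours_int image x y inverted (get_neighbours_int image x y inverted)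

-- ===== LEMMAS AND PROOFS =====

-- the 9-bit value determined by the nine membership bits, in A's scan order (MSB first)
def pvMask (b1 b2 b3 b4 b5 b6 b7 b8 b9 : Bool) : Int :=
  PySem.Int.bor (cond b1 256 0) (PySem.Int.bor (cond b2 128 0) (PySem.Int.bor (cond b3 64 0)
    (PySem.Int.bor (cond b4 32 0) (PySem.Int.bor (cond b5 16 0) (PySem.Int.bor (cond b6 8 0)
      (PySem.Int.bor (cond b7 4 0) (PySem.Int.bor (cond b8 2 0) (cond b9 1 0))))))))

-- one step of B's fold: OR-ing the looked-up weight of offset (u, v) into a mask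
set_option maxHeartbeats 4000000 in
theorem pv_step (u v : Int) (c1 c2 c3 c4 c5 c6 c7 c8 c9 : Bool) :
    PySem.Int.bor (pvMask c1 c2 c3 c4 c5 c6 c7 c8 c9) (pvWeights.getD (u, v) 0)
    = pvMask (c1 || decide ((u, v) = (-1, -1))) (c2 || decide ((u, v) = (0, -1)))
        (c3 || decide ((u, v) = (1, -1))) (c4 || decide ((u, v) = (-1, 0)))
        (c5 || decide ((u, v) = (0, 0))) (c6 || decide ((u, v) = (1, 0)))
        (c7 || decide ((u, v) = (-1, 1))) (c8 || decide ((u, v) = (0, 1)))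
        (c9 || decide ((u, v) = (1, 1))) := by
  by_cases h1 : (u, v) = ((-1 : Int), (-1 : Int))
  · obtain ⟨rfl, rfl⟩ := Prod.ext_iff.mp h1
    revert c1 c2 c3 c4 c5 c6 c7 c8 c9; decide
  by_cases h2 : (u, v) = ((0 : Int), (-1 : Int))
  · obtain ⟨rfl, rfl⟩ := Prod.ext_iff.mp h2
    revert c1 c2 c3 c4 c5 c6 c7 c8 c9; decide
  by_cases h3 : (u, v) = ((1 : Int), (-1 : Int))
  · obtain ⟨rfl, rfl⟩ := Prod.ext_iff.mp h3
    revert c1 c2 c3 c4 c5 c6 c7 c8 c9; decide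
  by_cases h4 : (u, v) = ((-1 : Int), (0 : Int))
  · obtain ⟨rfl, rfl⟩ := Prod.ext_iff.mp h4
    revert c1 c2 c3 c4 c5 c6 c7 c8 c9; decide
  by_cases h5 : (u, v) = ((0 : Int), (0 : Int))
  · obtain ⟨rfl, rfl⟩ := Prod.ext_iff.mp h5
    revert c1 c2 c3 c4 c5 c6 c7 c8 c9; decide
  by_cases h6 : (u, v) = ((1 : Int), (0 : Int))
  · obtain ⟨rfl, rfl⟩ := Prod.ext_iff.mp h6
    revert c1 c2 c3 c4 c5 c6 c7 c8 c9; decide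
  by_cases h7 : (u, v) = ((-1 : Int), (1 : Int))
  · obtain ⟨rfl, rfl⟩ := Prod.ext_iff.mp h7
    revert c1 c2 c3 c4 c5 c6 c7 c8 c9; decide
  by_cases h8 : (u, v) = ((0 : Int), (1 : Int))
  · obtain ⟨rfl, rfl⟩ := Prod.ext_iff.mp h8
    revert c1 c2 c3 c4 c5 c6 c7 c8 c9; decide
  by_cases h9 : (u, v) = ((1 : Int), (1 : Int))
  · obtain ⟨rfl, rfl⟩ := Prod.ext_iff.mp h9
    revert c1 c2 c3 c4 c5 c6 c7 c8 c9; decide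
  · have items : pvWeights.items = [((-1,-1),256), ((0,-1),128), ((1,-1),64),
        ((-1,0),32), ((0,0),16), ((1,0),8), ((-1,1),4), ((0,1),2), ((1,1),1)] := by decide
    have e1 : ((((-1 : Int), (-1 : Int)) : Int × Int) == (u, v)) = false :=
      beq_eq_false_iff_ne.mpr (fun e => h1 e.symm)
    have e2 : ((((0 : Int), (-1 : Int)) : Int × Int) == (u, v)) = false :=
      beq_eq_false_iff_ne.mpr (fun e => h2 e.symm)
    have e3 : ((((1 : Int), (-1 : Int)) : Int × Int) == (u, v)) = false :=
      beq_eq_false_iff_ne.mpr (fun e => h3 e.symm)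
    have e4 : ((((-1 : Int), (0 : Int)) : Int × Int) == (u, v)) = false :=
      beq_eq_false_iff_ne.mpr (fun e => h4 e.symm)
    have e5 : ((((0 : Int), (0 : Int)) : Int × Int) == (u, v)) = false :=
      beq_eq_false_iff_ne.mpr (fun e => h5 e.symm)
    have e6 : ((((1 : Int), (0 : Int)) : Int × Int) == (u, v)) = false :=
      beq_eq_false_iff_ne.mpr (fun e => h6 e.symm)
    have e7 : ((((-1 : Int), (1 : Int)) : Int × Int) == (u, v)) = false :=
      beq_eq_false_iff_ne.mpr (fun e => h7 e.symm)
    have e8 : ((((0 : Int), (1 : Int)) : Int × Int) == (u, v)) = false :=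
      beq_eq_false_iff_ne.mpr (fun e => h8 e.symm)
    have e9 : ((((1 : Int), (1 : Int)) : Int × Int) == (u, v)) = false :=
      beq_eq_false_iff_ne.mpr (fun e => h9 e.symm)
    have hz : pvWeights.getD (u, v) 0 = 0 := by
      simp [PySem.Dict.getD, PySem.Dict.get?, items, List.find?, e1, e2, e3, e4, e5, e6, e7, e8, e9]
    rw [hz]
    have d1 : decide ((u, v) = ((-1 : Int), (-1 : Int))) = false := decide_eq_false h1
    have d2 : decide ((u, v) = ((0 : Int), (-1 : Int))) = false := decide_eq_false h2
    have d3 : decide ((u, v) = ((1 : Int), (-1 : Int))) = false := decide_eq_false h3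
    have d4 : decide ((u, v) = ((-1 : Int), (0 : Int))) = false := decide_eq_false h4
    have d5 : decide ((u, v) = ((0 : Int), (0 : Int))) = false := decide_eq_false h5
    have d6 : decide ((u, v) = ((1 : Int), (0 : Int))) = false := decide_eq_false h6
    have d7 : decide ((u, v) = ((-1 : Int), (1 : Int))) = false := decide_eq_false h7
    have d8 : decide ((u, v) = ((0 : Int), (1 : Int))) = false := decide_eq_false h8
    have d9 : decide ((u, v) = ((1 : Int), (1 : Int))) = false := decide_eq_false h9
    rw [d1, d2, d3, d4, d5, d6, d7, d8, d9]
    simp only [Bool.or_false]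
    revert c1 c2 c3 c4 c5 c6 c7 c8 c9; decide

-- B's whole fold, characterised by the nine membership bits
theorem pv_fold (x y : Int) (l : List (Int × Int)) (c1 c2 c3 c4 c5 c6 c7 c8 c9 : Bool) :
    l.foldl (fun v p => PySem.Int.bor v (pvWeights.getD (p.1 - x, p.2 - y) 0))
        (pvMask c1 c2 c3 c4 c5 c6 c7 c8 c9)
    = pvMask (c1 || decide ((x + -1, y + -1) ∈ l)) (c2 || decide ((x + 0, y + -1) ∈ l))
        (c3 || decide ((x + 1, y + -1) ∈ l)) (c4 || decide ((x + -1, y + 0) ∈ l))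
        (c5 || decide ((x + 0, y + 0) ∈ l)) (c6 || decide ((x + 1, y + 0) ∈ l))
        (c7 || decide ((x + -1, y + 1) ∈ l)) (c8 || decide ((x + 0, y + 1) ∈ l))
        (c9 || decide ((x + 1, y + 1) ∈ l)) := by
  induction l generalizing c1 c2 c3 c4 c5 c6 c7 c8 c9 with
  | nil => simp
  | cons p l ih =>
    obtain ⟨px, py⟩ := p
    have k : ∀ a b : Int, decide ((x + a, y + b) = (px, py)) = decide ((px - x, py - y) = (a, b)) :=
      fun a b => decide_eq_decide.mpr (by simp only [Prod.mk.injEq]; omega)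
    simp only [List.foldl_cons]
    rw [pv_step, ih]
    simp only [List.mem_cons, Bool.decide_or, k, Bool.or_assoc]

-- both results, abstracted over the nine membership bits: A's string-parse value
-- equals B's mask (with the matching inversion), a closed 2^10-case check
set_option maxHeartbeats 4000000 in
theorem bits_core (b1 b2 b3 b4 b5 b6 b7 b8 b9 inverted : Bool) :
    (PySem.Int.ofStrBase?
      (let num : String :=
        ((((((((("" ++ (cond b1 "1" "0")) ++ (cond b2 "1" "0")) ++ (cond b3 "1" "0"))
          ++ (cond b4 "1" "0")) ++ (cond b5 "1" "0")) ++ (cond b6 "1" "0"))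
          ++ (cond b7 "1" "0")) ++ (cond b8 "1" "0")) ++ (cond b9 "1" "0"))
       cond inverted (String.mk (num.toList.map (fun c => cond (decide (c = '0')) '1' '0'))) num) 2).getD 0
    =
    (let val : Int := pvMask b1 b2 b3 b4 b5 b6 b7 b8 b9
     cond inverted (PySem.Int.bxor val 511) val) := by
  revert b1 b2 b3 b4 b5 b6 b7 b8 b9 inverted
  decide

-- ===== VERDICT (by name: the statement is the Claim_ definition above) =====
set_option maxHeartbeats 1000000 in
theorem get_neighbours_int_spec : Claim_equal_get_neighbours_int := by
  intro image x y inverted _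
  unfold Spec_get_neighbours_int get_neighbours_int get_neighbours_int_alt
  have h0 : pvMask false false false false false false false false false = 0 := by decide
  have hfold := pv_fold x y image false false false false false false false false false
  rw [h0] at hfold
  simp only [Bool.false_or] at hfold
  rw [hfold]
  simp only [List.foldl, ← Bool.cond_decide, Bool.decide_eq_true]
  exact bits_core (decide ((x + -1, y + -1) ∈ image)) (decide ((x + 0, y + -1) ∈ image))
    (decide ((x + 1, y + -1) ∈ image)) (decide ((x + -1, y + 0) ∈ image))
    (decide ((x + 0, y + 0) ∈ image)) (decide ((x + 1, y + 0) ∈ image))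
    (decide ((x + -1, y + 1) ∈ image)) (decide ((x + 0, y + 1) ∈ image))
    (decide ((x + 1, y + 1) ∈ image)) inverted
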